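-- pv_equiv track=rewrite | github.com/FlrnFrmm/AoC2019 | day4/main.py | two_adjacent_digits_are_the_same
-- ===== SOURCE A (Python) =====
-- def two_adjacent_digits_are_the_same(digits):
--     actual_value = digits[0]
--     count = 1
--     adjacent_sequences = []
--     for v in digits[1:]:
--         if actual_value == v:
--             count += 1
--         else:
--             adjacent_sequences.append(count)
--             actual_value = v
--             count = 1
--     adjacent_sequences.append(count)
--     return any([v == 2 for v in adjacent_sequences])
-- ===== SOURCE B (Python) =====
-- def two_adjacent_digits_are_the_same(digits):
--     padded = [None] + list(digits) + [None]
--     return any(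
--         b == c and a != b and c != d
--         for a, b, c, d in zip(padded, padded[1:], padded[2:], padded[3:])
--     )
-- ===== Notes on version B (the rewrite author's own statement) =====
-- stated objective: alternative
-- what changed: Instead of building the full list of run lengths and testing any(==2), B pads the list with None sentinels and scans 4-element sliding windows (zip of shifted slices), detecting a run of exactly two by its local boundary pattern b==c, a!=b, c!=d.
-- crash fix: On the empty list A raises IndexError (digits[0]); B returns False. — e.g. on two_adjacent_digits_are_the_same([]): A raises IndexError, B returns false
import Mathlib
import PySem

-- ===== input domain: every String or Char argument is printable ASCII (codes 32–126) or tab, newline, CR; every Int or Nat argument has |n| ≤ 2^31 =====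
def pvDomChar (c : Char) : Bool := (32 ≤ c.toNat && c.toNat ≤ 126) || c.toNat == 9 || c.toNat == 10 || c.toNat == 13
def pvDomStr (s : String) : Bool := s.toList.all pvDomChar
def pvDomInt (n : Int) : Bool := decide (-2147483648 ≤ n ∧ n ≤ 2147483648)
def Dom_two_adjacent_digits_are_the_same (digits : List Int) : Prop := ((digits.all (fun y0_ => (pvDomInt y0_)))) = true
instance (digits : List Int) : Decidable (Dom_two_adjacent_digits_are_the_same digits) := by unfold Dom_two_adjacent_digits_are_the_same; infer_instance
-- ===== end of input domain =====

-- B replaces A's run-length list with a padded 4-wide sliding-window scan (alternative decomposition, same cost);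
-- equivalence is about the return value; on [] A raises IndexError (excluded by Pre_) while B returns false.

-- ===== PORT A =====
def two_adjacent_digits_are_the_same (digits : List Int) : Bool :=
  match digits with
  | [] => false  -- Python: digits[0] raises IndexError here; excluded by Pre_
  | d0 :: _ =>
    let st := (PySem.List.slice digits (some 1) none).foldl
      (fun (s : Int × Int × List Int) v =>
        if s.1 == v then (s.1, s.2.1 + 1, s.2.2)
        else (v, 1, s.2.2 ++ [s.2.1]))
      (d0, 1, ([] : List Int))
    ((st.2.2 ++ [st.2.1]).map (fun v => v == 2)).any id

-- ===== PORT B =====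
def two_adjacent_digits_are_the_same_alt (digits : List Int) : Bool :=
  let padded : List (Option Int) := [none] ++ digits.map some ++ [none]
  (List.zip padded (List.zip (padded.drop 1) (List.zip (padded.drop 2) (padded.drop 3)))).any
    (fun q => (q.2.1 == q.2.2.1) && !(q.1 == q.2.1) && !(q.2.2.1 == q.2.2.2))

-- ===== PRECONDITION & SPEC =====
-- Pre_ excludes only the empty list, on which A raises IndexError (digits[0]).
def Pre_two_adjacent_digits_are_the_same (digits : List Int) : Prop := digits ≠ []
instance (digits : List Int) : Decidable (Pre_two_adjacent_digits_are_the_same digits) := by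
  unfold Pre_two_adjacent_digits_are_the_same; infer_instance
def pvWitness_two_adjacent_digits_are_the_same : List Int := [1, 2, 2, 3]

-- On the empty list A raises IndexError (digits[0]); B returns False.
def Raises_two_adjacent_digits_are_the_same (digits : List Int) : Prop := digits = []
instance (digits : List Int) : Decidable (Raises_two_adjacent_digits_are_the_same digits) := by
  unfold Raises_two_adjacent_digits_are_the_same; infer_instance
def pvRaiseWitness_two_adjacent_digits_are_the_same : List Int := []
def pvRaiseWitnessOut_two_adjacent_digits_are_the_same : Bool := false

def Spec_two_adjacent_digits_are_the_same (digits : List Int) (out : Bool) : Prop :=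
  out = two_adjacent_digits_are_the_same_alt digits
instance (digits : List Int) (out : Bool) : Decidable (Spec_two_adjacent_digits_are_the_same digits out) := by
  unfold Spec_two_adjacent_digits_are_the_same; infer_instance

-- ===== CLAIM (what is proved, stated in full; the proofs are below) =====
def Claim_equal_two_adjacent_digits_are_the_same : Prop := ∀ (digits : List Int), Dom_two_adjacent_digits_are_the_same digits → Pre_two_adjacent_digits_are_the_same digits → Spec_two_adjacent_digits_are_the_same digits (two_adjacent_digits_are_the_same digits)
def Claim_raises_two_adjacent_digits_are_the_same : Prop := (∀ (digits : List Int), Dom_two_adjacent_digits_are_the_same digits → Raises_two_adjacent_digits_are_the_same digits → ¬ Pre_two_adjacent_digits_are_the_same digits) ∧ (Dom_two_adjacent_digits_are_the_same (pvRaiseWitness_two_adjacent_digits_are_the_same) ∧ Raises_two_adjacent_digits_are_the_same (pvRaiseWitness_two_adjacent_digits_are_the_same) ∧ two_adjacent_digits_are_the_same_alt (pvRaiseWitness_two_adjacent_digits_are_the_same) = pvRaiseWitnessOut_two_adjacent_digits_are_the_same)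

-- ===== LEMMAS AND PROOFS =====

-- A's loop step (definitionally equal to the lambda in the port of A).
def pvStep (s : Int × Int × List Int) (v : Int) : Int × Int × List Int :=
  if s.1 == v then (s.1, s.2.1 + 1, s.2.2) else (v, 1, s.2.2 ++ [s.2.1])

-- A's scan, as a recursion: current run value a, current run length c.
def pvChk (a c : Int) : List Int → Bool
  | [] => c == 2
  | v :: vs => if a == v then pvChk a (c + 1) vs else ((c == 2) || pvChk v 1 vs)

-- B's scan, as a recursion: previous element p (none at the left edge), current element x.
def pvWchk (p : Option Int) (x : Int) : List Int → Bool
  | [] => false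
  | y :: ys => ((x == y) && !(p == some x) && !(some y == ys.head?)) || pvWchk (some x) y ys

def pvQuadAny (l : List (Option Int)) : Bool :=
  (List.zip l (List.zip (l.drop 1) (List.zip (l.drop 2) (l.drop 3)))).any
    (fun q => (q.2.1 == q.2.2.1) && !(q.1 == q.2.1) && !(q.2.2.1 == q.2.2.2))

theorem pvAlt_eq_quadAny (digits : List Int) :
    two_adjacent_digits_are_the_same_alt digits = pvQuadAny ([none] ++ digits.map some ++ [none]) := rfl

theorem pvQuadAny_cons (a b c d : Option Int) (t : List (Option Int)) :
    pvQuadAny (a :: b :: c :: d :: t)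
      = (((b == c) && !(a == b) && !(c == d)) || pvQuadAny (b :: c :: d :: t)) := by
  simp [pvQuadAny, List.zip]

theorem pvLA (rest : List Int) (a c : Int) (seqs : List Int) :
    (((rest.foldl pvStep (a, c, seqs)).2.2 ++ [(rest.foldl pvStep (a, c, seqs)).2.1]).any
        (fun v => v == 2))
      = (seqs.any (fun v => v == 2) || pvChk a c rest) := by
  induction rest generalizing a c seqs with
  | nil => simp [pvChk]
  | cons v vs ih =>
    simp only [List.foldl_cons, pvStep]
    by_cases h : (a == v) = true
    · rw [if_pos h, ih]
      simp [pvChk, h]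
    · rw [if_neg h, ih]
      simp [pvChk, h, Bool.or_assoc]

theorem pvLB (xs : List Int) (x : Int) (p : Option Int) :
    pvQuadAny (p :: some x :: xs.map some ++ [none]) = pvWchk p x xs := by
  induction xs generalizing p x with
  | nil => simp [pvQuadAny, pvWchk, List.zip]
  | cons y ys ih =>
    cases ys with
    | nil =>
      have h2 := ih y (some x)
      simp only [List.map_cons, List.map_nil, List.nil_append, List.cons_append] at h2 ⊢
      rw [pvQuadAny_cons, h2]
      simp [pvWchk]
    | cons y' ys' =>
      have h2 := ih y (some x)
      simp only [List.map_cons, List.cons_append] at h2 ⊢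
      rw [pvQuadAny_cons, h2]
      simp [pvWchk]

theorem pvLC (xs : List Int) (x c : Int) (p : Option Int)
    (hc : 1 ≤ c) (hiff : c = 1 ↔ p ≠ some x) :
    pvChk x c xs = (((c == 2) && !(some x == xs.head?)) || pvWchk p x xs) := by
  induction xs generalizing x c p with
  | nil =>
    simp [pvChk, pvWchk]
  | cons y ys ih =>
    by_cases h : x = y
    · subst h
      have h1 : pvChk x (c + 1) ys
          = ((((c + 1) == 2) && !(some x == ys.head?)) || pvWchk (some x) x ys) :=
        ih x (c + 1) (some x) (by omega) (by simp; omega)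
      have hce : ((c + 1 : Int) == 2) = !(p == some x) := by
        rcases hiff with ⟨h1', h2'⟩
        by_cases hp : p = some x
        · have : c ≠ 1 := fun hc1 => (h1' hc1) hp
          simp [hp]; omega
        · have : c = 1 := h2' hp
          simp [this, hp]
      have hstep : pvChk x c (x :: ys) = pvChk x (c + 1) ys := by simp [pvChk]
      rw [hstep, h1, hce]
      simp [pvWchk]
    · have h1 : pvChk y 1 ys
          = ((((1 : Int) == 2) && !(some y == ys.head?)) || pvWchk (some x) y ys) :=
        ih y 1 (some x) (le_refl 1) (by simp [h])
      have hstep : pvChk x c (y :: ys) = ((c == 2) || pvChk y 1 ys) := by simp [pvChk, h]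
      rw [hstep, h1]
      have hxy : ((x : Int) == y) = false := by simp [h]
      have hyx : ((some x : Option Int) == some y) = false := by simp [h]
      simp [pvWchk, hxy, hyx]

-- ===== VERDICT (by name: the statement is the Claim_ definition above) =====
theorem two_adjacent_digits_are_the_same_raises : Claim_raises_two_adjacent_digits_are_the_same := by
  unfold Claim_raises_two_adjacent_digits_are_the_same
  exact ⟨fun digits _ h => by
    simp [Raises_two_adjacent_digits_are_the_same] at h
    simp [h, Pre_two_adjacent_digits_are_the_same], by decide⟩

theorem two_adjacent_digits_are_the_same_spec : Claim_equal_two_adjacent_digits_are_the_same := by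
  intro digits hdom hpre
  unfold Spec_two_adjacent_digits_are_the_same
  match digits with
  | [] =>
    have h := two_adjacent_digits_are_the_same_raises
    unfold Claim_raises_two_adjacent_digits_are_the_same at h
    exact absurd hpre (h.1 [] hdom rfl)
  | x :: xs =>
    have hfold : ∀ (l : List Int) (init : Int × Int × List Int),
        l.foldl (fun (s : Int × Int × List Int) v =>
          if s.1 == v then (s.1, s.2.1 + 1, s.2.2) else (v, 1, s.2.2 ++ [s.2.1])) init
          = l.foldl pvStep init := fun l init => rfl
    have hA : two_adjacent_digits_are_the_same (x :: xs) = pvChk x 1 xs := by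
      simp only [two_adjacent_digits_are_the_same, PySem.List.slice_from_one, List.tail_cons,
        hfold, List.any_map]
      have := pvLA xs x 1 []
      simpa using this
    have hB : two_adjacent_digits_are_the_same_alt (x :: xs) = pvWchk none x xs := by
      rw [pvAlt_eq_quadAny]
      simpa using pvLB xs x none
    rw [hA, hB, pvLC xs x 1 none (le_refl 1) (by simp)]
    simp
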